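-- pv_equiv track=rewrite | github.com/NetLockJ/advent-of-code | 2015/Day-11/part1.py | password_to_dec
-- ===== SOURCE A (Python) =====
-- def password_to_dec(string):
--     pos, total = 0, 0
--     string = list(string)
--     string.reverse()
--     for char in string:
--         total += (ord(char) - 97) * 26 ** pos
--         pos += 1
--     return total
-- ===== SOURCE B (Python) =====
-- def password_to_dec(string):
--     total = 0
--     i = 0
--     n = len(string)
--     while i < n:
--         total = total * 26 + (ord(string[i]) - 97)
--         i += 1
--     return total
-- ===== Notes on version B (the rewrite author's own statement) =====
-- stated objective: faster
-- what changed: B uses Horner's method: a left-to-right while loop keeping one running accumulator (total = total*26 + digit), instead of copying and reversing the string and summing (ord(c)-97) * 26**pos per position.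
import Mathlib
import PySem

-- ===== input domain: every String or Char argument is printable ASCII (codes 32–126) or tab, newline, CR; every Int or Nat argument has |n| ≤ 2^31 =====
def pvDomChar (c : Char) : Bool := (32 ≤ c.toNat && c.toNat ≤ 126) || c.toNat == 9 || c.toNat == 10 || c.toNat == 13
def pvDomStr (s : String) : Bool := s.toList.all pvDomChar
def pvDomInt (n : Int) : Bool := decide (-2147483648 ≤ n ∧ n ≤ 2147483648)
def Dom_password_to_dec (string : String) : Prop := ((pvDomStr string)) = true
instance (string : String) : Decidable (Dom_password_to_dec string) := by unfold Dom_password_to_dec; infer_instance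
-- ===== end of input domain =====

-- B replaces the reverse-a-copy-and-sum-powers loop by a left-to-right Horner while-loop with one running accumulator (faster: no per-position 26**pos).


-- ===== PORT A =====
-- for char in reversed(list(string)): total += (ord(char) - 97) * 26 ** pos; pos += 1
def password_to_dec (string : String) : Int :=
  (string.toList.reverse.foldl
    (fun (s : Int × Int) (c : Char) => (s.1 + 1, s.2 + ((c.toNat : Int) - 97) * 26 ^ s.1.toNat))
    (0, 0)).2

-- ===== PORT B =====
-- while i < n: total = total * 26 + (ord(string[i]) - 97); i += 1
-- The while loop over index i is transliterated as structural recursion on the suffix of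
-- characters not yet consumed, carrying the accumulator `total`.
def pvHornerLoop : List Char → Int → Int
  | [], total => total
  | c :: rest, total => pvHornerLoop rest (total * 26 + ((c.toNat : Int) - 97))

def password_to_dec_alt (string : String) : Int :=
  pvHornerLoop string.toList 0

-- ===== PRECONDITION & SPEC =====
def Spec_password_to_dec (string : String) (out : Int) : Prop := out = password_to_dec_alt string
instance (string : String) (out : Int) : Decidable (Spec_password_to_dec string out) := by unfold Spec_password_to_dec; infer_instance

-- ===== CLAIM (what is proved, stated in full; the proofs are below) =====
def Claim_equal_password_to_dec : Prop := ∀ (string : String), Dom_password_to_dec string → Spec_password_to_dec string (password_to_dec string)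

-- ===== LEMMAS AND PROOFS =====

def pvStepA (s : Int × Int) (c : Char) : Int × Int :=
  (s.1 + 1, s.2 + ((c.toNat : Int) - 97) * 26 ^ s.1.toNat)

theorem pvStepA_fst (r : List Char) (pos total : Int) :
    (r.foldl pvStepA (pos, total)).1 = pos + r.length := by
  induction r generalizing pos total with
  | nil => simp
  | cons a r ih => simp [pvStepA, ih]; ring

theorem pvHorner_shift (l : List Char) (t : Int) :
    pvHornerLoop l t = t * 26 ^ l.length + pvHornerLoop l 0 := by
  induction l generalizing t with
  | nil => simp [pvHornerLoop]
  | cons a l ih =>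
    simp only [pvHornerLoop, List.length_cons]
    rw [ih (t * 26 + ((a.toNat : Int) - 97)), ih (0 * 26 + ((a.toNat : Int) - 97))]
    simp [pow_succ]
    ring

theorem pvMain (l : List Char) (pos total : Int) (hpos : 0 ≤ pos) :
    (l.reverse.foldl pvStepA (pos, total)).2 = total + 26 ^ pos.toNat * pvHornerLoop l 0 := by
  induction l generalizing pos total with
  | nil => simp [pvHornerLoop]
  | cons a l ih =>
    simp only [List.reverse_cons, List.foldl_append, List.foldl_cons, List.foldl_nil]
    have hfst := pvStepA_fst l.reverse pos total
    have hsnd := ih pos total hpos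
    rcases hs : l.reverse.foldl pvStepA (pos, total) with ⟨p, t⟩
    rw [hs] at hfst hsnd
    simp only at hfst hsnd
    rw [List.length_reverse] at hfst
    simp only [pvStepA]
    have hp : p.toNat = pos.toNat + l.length := by omega
    rw [hsnd, hp]
    simp only [pvHornerLoop]
    rw [pvHorner_shift l (0 * 26 + ((a.toNat : Int) - 97))]
    simp [pow_add]
    ring

-- ===== VERDICT (by name: the statement is the Claim_ definition above) =====
theorem password_to_dec_spec : Claim_equal_password_to_dec := by
  intro s _
  unfold Spec_password_to_dec password_to_dec password_to_dec_alt
  have := pvMain s.toList 0 0 le_rfl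
  simpa [pvStepA] using this
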